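-- pv_equiv track=rewrite | github.com/enzomarx/DataWrangling | pdf_to_excel.py | extract_tables_from_text
-- ===== SOURCE A (Python) =====
-- def extract_tables_from_text(text):
--     lines = text.split('\n')
--     tables = []
--     table = []
--     for line in lines:
--         if line.strip() == "":
--             if table:
--                 tables.append(table)
--                 table = []
--         else:
--             table.append(line.split())
--     if table:
--         tables.append(table)
--     return tables
-- ===== SOURCE B (Python) =====
-- def extract_tables_from_text(text):
--     # Two-pointer run scan: carve maximal runs of non-blank lines by index,
--     # instead of A's accumulator/flush state machine.
--     lines = text.split('\n')
--     n = len(lines)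
--     tables = []
--     i = 0
--     while i < n:
--         if lines[i].strip() == "":
--             i += 1
--             continue
--         j = i
--         while j < n and lines[j].strip() != "":
--             j += 1
--         tables.append([line.split() for line in lines[i:j]])
--         i = j
--     return tables
-- ===== Notes on version B (the rewrite author's own statement) =====
-- stated objective: alternative
-- what changed: Replaced A's accumulator/flush state machine with a two-pointer scan that carves maximal runs of non-blank lines by index and splits each run in one comprehension.
import Mathlib
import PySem

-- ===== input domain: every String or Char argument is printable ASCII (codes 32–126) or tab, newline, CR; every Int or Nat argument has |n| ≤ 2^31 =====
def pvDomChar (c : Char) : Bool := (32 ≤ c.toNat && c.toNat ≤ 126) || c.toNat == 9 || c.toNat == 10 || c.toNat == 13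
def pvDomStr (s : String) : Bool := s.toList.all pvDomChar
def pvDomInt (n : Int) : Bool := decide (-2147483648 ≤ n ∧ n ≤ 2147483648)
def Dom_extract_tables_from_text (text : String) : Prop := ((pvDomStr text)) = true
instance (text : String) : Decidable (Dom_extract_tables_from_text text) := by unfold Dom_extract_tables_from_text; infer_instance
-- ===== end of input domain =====

-- B replaces A's accumulator/flush state machine with a two-pointer run scan (alternative decomposition, same cost).


-- ===== PORT A =====
-- A's loop: state (tables, table); blank line flushes the partial table, other lines extend it.
def pvStepA (s : List (List (List String)) × List (List String)) (line : String) :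
    List (List (List String)) × List (List String) :=
  if PySem.Str.strip line == "" then
    if s.2 ≠ [] then (s.1 ++ [s.2], []) else s
  else (s.1, s.2 ++ [PySem.Str.split₀ line])

def extract_tables_from_text (text : String) : List (List (List String)) :=
  let lines := (PySem.Str.split? text "\n").getD []
  let s := lines.foldl pvStepA ([], [])
  if s.2 ≠ [] then s.1 ++ [s.2] else s.1

-- ===== PORT B =====
-- B's outer while loop: skip blank lines; otherwise the inner while is a span
-- taking the maximal non-blank run, which becomes one table.
def pvBlank (line : String) : Bool := PySem.Str.strip line == ""

def pvGoB : List String → List (List (List String))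
  | [] => []
  | l :: ls =>
    if pvBlank l then pvGoB ls
    else
      let p := List.span (fun x => !pvBlank x) ls
      (PySem.Str.split₀ l :: p.1.map PySem.Str.split₀) :: pvGoB p.2
termination_by xs => xs.length
decreasing_by
  all_goals
    simp only [List.span_eq_takeWhile_dropWhile, List.length_cons]
    first
      | omega
      | (have := List.length_dropWhile_le (p := fun x => !pvBlank x) (l := ls); omega)

def extract_tables_from_text_alt (text : String) : List (List (List String)) :=
  pvGoB ((PySem.Str.split? text "\n").getD [])

-- ===== PRECONDITION & SPEC =====
def Spec_extract_tables_from_text (text : String) (out : List (List (List String))) : Prop := out = extract_tables_from_text_alt text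
instance (text : String) (out : List (List (List String))) : Decidable (Spec_extract_tables_from_text text out) := by unfold Spec_extract_tables_from_text; infer_instance

-- ===== CLAIM (what is proved, stated in full; the proofs are below) =====
def Claim_equal_extract_tables_from_text : Prop := ∀ (text : String), Dom_extract_tables_from_text text → Spec_extract_tables_from_text text (extract_tables_from_text text)

-- ===== LEMMAS AND PROOFS =====

-- what B produces from the remaining lines when a partial table `table` is open
def pvCont (table : List (List String)) : List String → List (List (List String))
  | [] => if table = [] then [] else [table]
  | l :: ls =>
    if pvBlank l then (if table = [] then [] else [table]) ++ pvGoB ls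
    else
      let p := List.span (fun x => !pvBlank x) ls
      (table ++ PySem.Str.split₀ l :: p.1.map PySem.Str.split₀) :: pvGoB p.2

theorem pvCont_nil_eq (ls : List String) : pvCont [] ls = pvGoB ls := by
  cases ls with
  | nil => simp [pvCont, pvGoB]
  | cons l ls => by_cases hb : pvBlank l <;> simp [pvCont, pvGoB, hb]

theorem pvInvariant (ls : List String) :
    ∀ tables table,
      (let s := ls.foldl pvStepA (tables, table); if s.2 ≠ [] then s.1 ++ [s.2] else s.1)
        = tables ++ pvCont table ls := by
  induction ls with
  | nil =>
    intro tables table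
    by_cases h : table = [] <;> simp [pvCont, h]
  | cons l ls ih =>
    intro tables table
    by_cases hb : pvBlank l
    · by_cases ht : table = []
      · subst ht
        have hs : pvStepA (tables, []) l = (tables, []) := by
          simp only [pvBlank, beq_iff_eq] at hb
          simp [pvStepA, hb]
        rw [List.foldl_cons, hs, ih, pvCont_nil_eq]
        simp [pvCont, hb]
      · have hs : pvStepA (tables, table) l = (tables ++ [table], []) := by
          simp only [pvBlank, beq_iff_eq] at hb
          simp [pvStepA, hb, ht]
        rw [List.foldl_cons, hs, ih, pvCont_nil_eq]
        simp [pvCont, hb, ht]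
    · have hs : pvStepA (tables, table) l = (tables, table ++ [PySem.Str.split₀ l]) := by
        simp only [pvBlank, beq_iff_eq] at hb
        simp [pvStepA, hb]
      rw [List.foldl_cons, hs, ih]
      congr 1
      cases ls with
      | nil => simp [pvCont, hb, pvGoB, List.span_eq_takeWhile_dropWhile]
      | cons l' ls' =>
        by_cases hb' : pvBlank l' <;>
          simp [pvCont, hb, hb', pvGoB, List.span_eq_takeWhile_dropWhile]

-- ===== VERDICT (by name: the statement is the Claim_ definition above) =====
theorem extract_tables_from_text_spec : Claim_equal_extract_tables_from_text := by
  intro text _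
  unfold Spec_extract_tables_from_text extract_tables_from_text extract_tables_from_text_alt
  have := pvInvariant ((PySem.Str.split? text "\n").getD []) [] []
  simpa [pvCont_nil_eq] using this
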